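-- pv_equiv track=rewrite | github.com/descartesmbogning/preprint-harvester | src/preprint_harvester/harvesters.py | _datacite_type_query_from_tokens
-- ===== SOURCE A (Python) =====
-- def _datacite_type_query_from_tokens(tokens: list[str]) -> str | None:
--     """
--     Build a DataCite query fragment for requested record types WITHOUT causing
--     "everything is Text" duplication.
--
--     Rules:
--     - "text" => resourceTypeGeneral:"Text"
--     - "report" => resourceType:"Report"
--     - "journal-article"/"article" => resourceType:"Journal article"
--     - "conference-paper" => resourceType:"Conference paper"
--     - "conference-proceeding" => resourceType:"Conference proceeding" OR "Proceedings"
--     - "preprint" is handled elsewhere via resource-type-id=Preprint (recommended)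
--     - "all" / "other" => no clause
--     """
--     if not tokens:
--         return None
--
--     # normalize
--     norm = []
--     for t in tokens:
--         if t is None:
--             continue
--         t = str(t).strip().lower()
--         if not t:
--             continue
--         if t in ("journal-article",):
--             t = "article"
--         norm.append(t)
--
--     # if "all" present, no restriction
--     if "all" in norm:
--         return None
--
--     clauses = []
--
--     if "text" in norm:
--         clauses.append('types.resourceType:"Text"')
--
--     if "report" in norm:
--         clauses.append('types.resourceType:"Report"')
--
--     if "article" in norm:
--         clauses.append('types.resourceType:"Journal article"')
--
--     if "conference-paper" in norm:
--         clauses.append('types.resourceType:"Conference paper"')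
--
--     if "conference-proceeding" in norm:
--         clauses.append('types.resourceType:"Conference proceeding"')
--         clauses.append('types.resourceType:"Proceedings"')
--
--     if "other" in norm:
--         clauses.append('types.resourceType:"Other"')
--
--     # do not attempt to query "other"
--     # do not handle "preprint" here (you already have resource-type-id=Preprint)
--
--     clauses = sorted(set(clauses))
--     if not clauses:
--         return None
--
--     return "(" + " OR ".join(clauses) + ")"
-- ===== SOURCE B (Python) =====
-- # B: table-driven single pass over the normalized tokens instead of six separate
-- # membership scans; same normalization, 'all' short-circuit and sorted(set(...)) finish.
-- _TYPE_CLAUSES = {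
--     "text": ('types.resourceType:"Text"',),
--     "report": ('types.resourceType:"Report"',),
--     "article": ('types.resourceType:"Journal article"',),
--     "conference-paper": ('types.resourceType:"Conference paper"',),
--     "conference-proceeding": ('types.resourceType:"Conference proceeding"',
--                               'types.resourceType:"Proceedings"'),
--     "other": ('types.resourceType:"Other"',),
-- }
--
--
-- def _datacite_type_query_from_tokens(tokens: list[str]) -> str | None:
--     if not tokens:
--         return None
--
--     norm = []
--     for t in tokens:
--         if t is None:
--             continue
--         t = str(t).strip().lower()
--         if not t:
--             continue
--         if t == "journal-article":
--             t = "article"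
--         norm.append(t)
--
--     if "all" in norm:
--         return None
--
--     clauses = []
--     for t in norm:
--         clauses.extend(_TYPE_CLAUSES.get(t, ()))
--
--     clauses = sorted(set(clauses))
--     if not clauses:
--         return None
--     return "(" + " OR ".join(clauses) + ")"
-- ===== Notes on version B (the rewrite author's own statement) =====
-- stated objective: idiomatic
-- what changed: Replaces the six separate membership scans over the normalized token list with a module-level token-to-clauses table and one pass over the normalized list extending a clause list; the sorted(set(...)) finish makes order and duplicates irrelevant.
import Mathlib
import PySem

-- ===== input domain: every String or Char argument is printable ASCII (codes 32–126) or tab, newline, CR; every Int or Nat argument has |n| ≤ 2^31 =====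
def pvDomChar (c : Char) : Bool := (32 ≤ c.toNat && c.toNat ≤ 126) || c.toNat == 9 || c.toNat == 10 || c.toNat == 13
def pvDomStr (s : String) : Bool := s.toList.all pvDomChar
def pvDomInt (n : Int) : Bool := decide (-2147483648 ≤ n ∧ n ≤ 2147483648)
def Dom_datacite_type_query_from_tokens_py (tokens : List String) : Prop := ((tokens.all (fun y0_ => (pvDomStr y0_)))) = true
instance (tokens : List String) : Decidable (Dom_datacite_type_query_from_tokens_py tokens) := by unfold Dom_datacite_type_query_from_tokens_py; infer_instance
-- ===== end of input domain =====

-- B replaces A's six per-keyword membership scans by a token→clauses table and one pass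
-- over the normalized list (idiomatic, not measurably faster). Proved equal on all inputs.

-- ===== PORT A =====
-- normalization loop, identical code in A and B (the 'if t is None' branch cannot fire
-- for a List String argument; 'str(t)' is the identity on a str)
def pvNorm (tokens : List String) : List String :=
  tokens.foldl (fun norm t =>
    let t := PySem.Str.lower (PySem.Str.strip t)
    if t = "" then norm
    else
      let t := if t = "journal-article" then "article" else t
      norm ++ [t]) []

-- the six 'if <kw> in norm: clauses.append(...)' statements of A
def pvClausesA (norm : List String) : List String :=
  let clauses : List String := []
  let clauses := if norm.contains "text" then clauses ++ ["types.resourceType:\"Text\""] else clauses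
  let clauses := if norm.contains "report" then clauses ++ ["types.resourceType:\"Report\""] else clauses
  let clauses := if norm.contains "article" then clauses ++ ["types.resourceType:\"Journal article\""] else clauses
  let clauses := if norm.contains "conference-paper" then clauses ++ ["types.resourceType:\"Conference paper\""] else clauses
  let clauses := if norm.contains "conference-proceeding" then clauses ++ ["types.resourceType:\"Conference proceeding\"", "types.resourceType:\"Proceedings\""] else clauses
  let clauses := if norm.contains "other" then clauses ++ ["types.resourceType:\"Other\""] else clauses
  clauses

def datacite_type_query_from_tokens_py (tokens : List String) : Option String :=
  if tokens = [] then none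
  else
    let norm := pvNorm tokens
    if norm.contains "all" then none
    else
      if PySem.List.sorted (PySem.Set.ofList (pvClausesA norm)) (fun x => x) false = [] then none
      else some ("(" ++ PySem.Str.join " OR " (PySem.List.sorted (PySem.Set.ofList (pvClausesA norm)) (fun x => x) false) ++ ")")

-- ===== PORT B =====
-- the module-level dict _TYPE_CLAUSES, looked up with .get(t, ())
def pvTable (t : String) : List String :=
  if t = "text" then ["types.resourceType:\"Text\""]
  else if t = "report" then ["types.resourceType:\"Report\""]
  else if t = "article" then ["types.resourceType:\"Journal article\""]
  else if t = "conference-paper" then ["types.resourceType:\"Conference paper\""]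
  else if t = "conference-proceeding" then ["types.resourceType:\"Conference proceeding\"", "types.resourceType:\"Proceedings\""]
  else if t = "other" then ["types.resourceType:\"Other\""]
  else []

-- B's single pass: 'for t in norm: clauses.extend(_TYPE_CLAUSES.get(t, ()))'
def pvClausesB (norm : List String) : List String :=
  norm.foldl (fun clauses t => clauses ++ pvTable t) []

def datacite_type_query_from_tokens_py_alt (tokens : List String) : Option String :=
  if tokens = [] then none
  else
    let norm := pvNorm tokens
    if norm.contains "all" then none
    else
      if PySem.List.sorted (PySem.Set.ofList (pvClausesB norm)) (fun x => x) false = [] then none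
      else some ("(" ++ PySem.Str.join " OR " (PySem.List.sorted (PySem.Set.ofList (pvClausesB norm)) (fun x => x) false) ++ ")")

-- ===== PRECONDITION & SPEC =====
def Spec_datacite_type_query_from_tokens_py (tokens : List String) (out : Option String) : Prop := out = datacite_type_query_from_tokens_py_alt tokens
instance (tokens : List String) (out : Option String) : Decidable (Spec_datacite_type_query_from_tokens_py tokens out) := by unfold Spec_datacite_type_query_from_tokens_py; infer_instance

-- ===== CLAIM (what is proved, stated in full; the proofs are below) =====
def Claim_equal_datacite_type_query_from_tokens_py : Prop := ∀ (tokens : List String), Dom_datacite_type_query_from_tokens_py tokens → Spec_datacite_type_query_from_tokens_py tokens (datacite_type_query_from_tokens_py tokens)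

-- ===== LEMMAS AND PROOFS =====

theorem mem_clausesB (norm : List String) (a : String) :
    a ∈ pvClausesB norm ↔ ∃ t ∈ norm, a ∈ pvTable t := by
  unfold pvClausesB
  rw [PySem.List.foldl_append_eq_flatMap]
  simp [List.mem_flatMap]

theorem mem_ite_append {c : Prop} [Decidable c] {l m : List String} {a : String} :
    (a ∈ (if c then l ++ m else l)) ↔ a ∈ l ∨ (c ∧ a ∈ m) := by
  split_ifs with h <;> simp [h]

theorem mem_clauses_iff (norm : List String) (a : String) :
    a ∈ pvClausesA norm ↔ a ∈ pvClausesB norm := by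
  rw [mem_clausesB]
  show (a ∈ (if _ then _ ++ _ else _)) ↔ _
  rw [mem_ite_append, mem_ite_append, mem_ite_append, mem_ite_append, mem_ite_append,
    mem_ite_append]
  simp only [false_or, List.mem_cons, List.not_mem_nil, or_false]
  constructor
  · intro h
    rcases h with ((((⟨ht, ha⟩ | ⟨ht, ha⟩) | ⟨ht, ha⟩) | ⟨ht, ha⟩) | ⟨ht, ha | ha⟩) | ⟨ht, ha⟩ <;>
      subst ha
    · exact ⟨"text", by simpa using ht, by simp [pvTable]⟩
    · exact ⟨"report", by simpa using ht, by simp [pvTable]⟩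
    · exact ⟨"article", by simpa using ht, by simp [pvTable]⟩
    · exact ⟨"conference-paper", by simpa using ht, by simp [pvTable]⟩
    · exact ⟨"conference-proceeding", by simpa using ht, by simp [pvTable]⟩
    · exact ⟨"conference-proceeding", by simpa using ht, by simp [pvTable]⟩
    · exact ⟨"other", by simpa using ht, by simp [pvTable]⟩
  · rintro ⟨t, ht, ha⟩
    unfold pvTable at ha
    split_ifs at ha with h1 h2 h3 h4 h5 h6 <;> simp at ha
    · subst h1; exact Or.inl (Or.inl (Or.inl (Or.inl (Or.inl ⟨by simpa using ht, ha⟩))))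
    · subst h2; exact Or.inl (Or.inl (Or.inl (Or.inl (Or.inr ⟨by simpa using ht, ha⟩))))
    · subst h3; exact Or.inl (Or.inl (Or.inl (Or.inr ⟨by simpa using ht, ha⟩)))
    · subst h4; exact Or.inl (Or.inl (Or.inr ⟨by simpa using ht, ha⟩))
    · subst h5; exact Or.inl (Or.inr ⟨by simpa using ht, ha⟩)
    · subst h6; exact Or.inr ⟨by simpa using ht, ha⟩

theorem sorted_clauses_eq (norm : List String) :
    PySem.List.sorted (PySem.Set.ofList (pvClausesA norm)) (fun x => x) false
      = PySem.List.sorted (PySem.Set.ofList (pvClausesB norm)) (fun x => x) false := by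
  apply PySem.List.sorted_eq_sorted_of_perm _ _ _ (fun a b h => h)
  rw [List.perm_ext_iff_of_nodup (PySem.Set.nodup_ofList _) (PySem.Set.nodup_ofList _)]
  intro a
  rw [PySem.Set.mem_ofList, PySem.Set.mem_ofList]
  exact mem_clauses_iff norm a

-- ===== VERDICT (by name: the statement is the Claim_ definition above) =====
theorem datacite_type_query_from_tokens_py_spec : Claim_equal_datacite_type_query_from_tokens_py := by
  intro tokens _
  unfold Spec_datacite_type_query_from_tokens_py
  unfold datacite_type_query_from_tokens_py datacite_type_query_from_tokens_py_alt
  simp only [sorted_clauses_eq]
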